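-- pv_equiv track=rewrite | github.com/xiaobingling93-pixel/Ascend-msprobe | python/msprobe/core/dump/dump2db/dump2db.py | reindex_keys_with_mapping
-- ===== SOURCE A (Python) =====
-- from collections import defaultdict
--
-- def reindex_keys_with_mapping(original_dict):
--     """
--     将同一个micro step的module和api，重新编号，同时返回映射关系
--
--     Args:
--         original_dict: 原始字典，格式为 {'Tensor.add.10.forward': 3, ...}
--     Returns:
--         key_mapping: 映射字典 {'Tensor.add.10.forward': 新k'Tensor.add.0.forward'})
--     """
--     # 按照原始value分组
--     grouped_by_value = defaultdict(list)
--     for key, value in original_dict.items():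
--         grouped_by_value[value].append(key)
--
--     key_mapping = {}  # 存储原始key到新key的映射
--     for _, keys in grouped_by_value.items():
--         prefix_groups = defaultdict(list)
--         for key in keys:
--             parts = key.split('.')
--             # 检查倒数第一位是否为数字: Module
--             if len(parts) >= 1 and parts[-1].isdigit():
--                 prefix = '.'.join(parts[:-1])  # 除最后一位外的其他部分
--                 # 31
--                 number = int(parts[-1])
--                 prefix_groups[prefix].append((number, key))
--             elif len(parts) >= 2 and parts[-2].isdigit():
--                 prefix = '.'.join(parts[:-2]) + '.' + parts[-1]  # 除倒数第二位外的其他部分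
--                 number = int(parts[-2])
--                 prefix_groups[prefix].append((number, key))
--             else:
--                 # 如果最后两位都不是数字，直接使用整个key作为前缀
--                 prefix_groups[key].append((0, key))
--
--         # 对每组前缀进行重新编号
--         for prefix, items in prefix_groups.items():
--             # 按原数字排序
--             sorted_items = sorted(items, key=lambda x: x[0])
--             for new_index, (_, original_key) in enumerate(sorted_items):
--                 # 重新构造key：前缀 + 新索引
--                 original_parts = original_key.split('.')
--                 if len(original_parts) >= 1 and original_parts[-1].isdigit():
--                     new_key = f"{prefix}.{new_index}"
--                 elif len(original_parts) >= 2 and original_parts[-2].isdigit():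
--                     parts = original_parts.copy()
--                     parts[-2] = str(new_index)
--                     new_key = '.'.join(parts)
--                 else:
--                     new_key = original_key
--                 # 记录映射关系
--                 key_mapping[original_key] = new_key
--     return key_mapping
-- ===== SOURCE B (Python) =====
-- from collections import defaultdict
--
-- def reindex_keys_with_mapping(original_dict):
--     """Renumber module/api keys per (value, prefix) group; return old-key -> new-key."""
--     # One parse pass: each key becomes a record (number, value, prefix, key, kind),
--     # where kind says where the numeric index sits (1 = last part, 2 = second-to-last,
--     # 0 = none).  The same pass records the emission skeleton: values in first-seen
--     # order, and for each value its prefixes in first-seen order.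
--     records = []
--     prefix_order = defaultdict(dict)   # value -> {prefix: None}, first-occurrence order
--     for key, value in original_dict.items():
--         parts = key.split('.')
--         if parts[-1].isdigit():
--             prefix, number, kind = '.'.join(parts[:-1]), int(parts[-1]), 1
--         elif len(parts) >= 2 and parts[-2].isdigit():
--             prefix, number, kind = '.'.join(parts[:-2]) + '.' + parts[-1], int(parts[-2]), 2
--         else:
--             prefix, number, kind = key, 0, 0
--         records.append((number, value, prefix, key, kind))
--         prefix_order[value][prefix] = None
--
--     # One global stable sort by the numeric index; bucketing the sorted stream then
--     # yields every (value, prefix) bucket already in sorted (and tie-stable) order.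
--     records.sort(key=lambda r: r[0])
--     buckets = defaultdict(list)        # (value, prefix) -> [(key, kind), ...]
--     for _, value, prefix, key, kind in records:
--         buckets[(value, prefix)].append((key, kind))
--
--     # Emit along the skeleton, rebuilding each new key from its stored kind.
--     key_mapping = {}
--     for value, prefixes in prefix_order.items():
--         for prefix in prefixes:
--             for new_index, (key, kind) in enumerate(buckets[(value, prefix)]):
--                 if kind == 1:
--                     new_key = f"{prefix}.{new_index}"
--                 elif kind == 2:
--                     p = key.split('.')
--                     new_key = '.'.join(p[:-2] + [str(new_index), p[-1]])
--                 else: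
--                     new_key = key
--                 key_mapping[key] = new_key
--     return key_mapping
-- ===== Notes on version B (the rewrite author's own statement) =====
-- stated objective: alternative
-- what changed: B parses every key exactly once into a (number, value, prefix, key, kind) record, performs ONE global stable sort of all records by the numeric index and then buckets the sorted stream, so every (value, prefix) group comes out already renumber-ready with no per-group sorts; new keys are rebuilt from the stored kind tag and emission follows an ordering skeleton collected during the parse pass, whereas A nests per-value and per-prefix defaultdicts, sorts each group separately and re-splits and re-tests every key a second time at reconstruction.
import Mathlib
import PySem

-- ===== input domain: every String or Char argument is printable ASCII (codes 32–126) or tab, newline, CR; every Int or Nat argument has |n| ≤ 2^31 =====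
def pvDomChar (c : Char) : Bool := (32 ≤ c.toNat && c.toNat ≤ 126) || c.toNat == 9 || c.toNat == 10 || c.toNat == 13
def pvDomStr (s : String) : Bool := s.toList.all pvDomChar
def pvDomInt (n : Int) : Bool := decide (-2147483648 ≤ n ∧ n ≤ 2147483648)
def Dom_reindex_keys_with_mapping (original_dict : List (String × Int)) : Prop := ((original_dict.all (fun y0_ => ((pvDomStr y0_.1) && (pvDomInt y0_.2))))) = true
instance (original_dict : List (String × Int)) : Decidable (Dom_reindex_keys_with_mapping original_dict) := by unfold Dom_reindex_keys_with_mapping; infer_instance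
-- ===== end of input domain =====

-- B parses each key once into a (number, value, prefix, key, kind) record, does ONE
-- global stable sort by the numeric index and buckets the sorted stream (so no
-- per-group sorts), emitting along an ordering skeleton; A nests per-value/per-prefix
-- dicts, sorts each group and re-splits every key at reconstruction (objective: alternative).


-- ===== PORT A =====
-- shared model of the parameter: `original_dict.items()` of the Python dict built
-- from the association list (last value wins, first position kept)
def pvItems (original_dict : List (String × Int)) : List (String × Int) :=
  (original_dict.foldl (fun d kv => d.insert kv.1 kv.2) PySem.Dict.empty).items

-- key.split('.')  (separator is never empty, so split? never returns none)
def pvSplitDot (key : String) : List String :=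
  (PySem.Str.split? key ".").getD []

-- A's inner grouping step: the three-branch body of `for key in keys: ...`
-- int(parts[-1]) is guarded by isdigit, so ofStr? never returns none here
def pvStepA (d : PySem.Dict String (List (Int × String))) (key : String) :
    PySem.Dict String (List (Int × String)) :=
  let parts := pvSplitDot key
  if decide (1 ≤ parts.length) && PySem.Str.strIsdigit (PySem.List.pyGetD parts (-1) "") then
    d.modify (PySem.Str.join "." (PySem.List.slice parts none (some (-1)))) []
      (fun l => l ++ [((PySem.Int.ofStr? (PySem.List.pyGetD parts (-1) "")).getD 0, key)])
  else if decide (2 ≤ parts.length) && PySem.Str.strIsdigit (PySem.List.pyGetD parts (-2) "") then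
    d.modify (PySem.Str.join "." (PySem.List.slice parts none (some (-2))) ++ "." ++ PySem.List.pyGetD parts (-1) "") []
      (fun l => l ++ [((PySem.Int.ofStr? (PySem.List.pyGetD parts (-2) "")).getD 0, key)])
  else
    d.modify key [] (fun l => l ++ [((0 : Int), key)])

-- A's reconstruction of the new key from the group prefix, original key and new index
def pvReconA (pfx okey : String) (idx : Int) : String :=
  let oparts := pvSplitDot okey
  if decide (1 ≤ oparts.length) && PySem.Str.strIsdigit (PySem.List.pyGetD oparts (-1) "") then
    pfx ++ "." ++ PySem.Int.toStr idx
  else if decide (2 ≤ oparts.length) && PySem.Str.strIsdigit (PySem.List.pyGetD oparts (-2) "") then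
    PySem.Str.join "." (PySem.List.pySetD oparts (-2) (PySem.Int.toStr idx))
  else okey

def reindex_keys_with_mapping (original_dict : List (String × Int)) : List (String × String) :=
  let items := pvItems original_dict
  let grouped := items.foldl (fun d kv => d.modify kv.2 [] (fun l => l ++ [kv.1])) PySem.Dict.empty
  let km := grouped.items.foldl (fun km g =>
      let pg := g.2.foldl pvStepA PySem.Dict.empty
      pg.items.foldl (fun km pi =>
          (PySem.List.enumerate (PySem.List.sorted pi.2 (fun x => x.1) false) 0).foldl
            (fun km e => km.insert e.2.2 (pvReconA pi.1 e.2.2 e.1)) km)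
        km)
    PySem.Dict.empty
  km.items

-- ===== PORT B =====
-- parse a key once: (prefix, number, kind); kind 1 = trailing index, 2 = second-to-last, 0 = none
def pvParse (key : String) : String × Int × Int :=
  let parts := pvSplitDot key
  if PySem.Str.strIsdigit (PySem.List.pyGetD parts (-1) "") then
    (PySem.Str.join "." (PySem.List.slice parts none (some (-1))),
     (PySem.Int.ofStr? (PySem.List.pyGetD parts (-1) "")).getD 0, 1)
  else if decide (2 ≤ parts.length) && PySem.Str.strIsdigit (PySem.List.pyGetD parts (-2) "") then
    (PySem.Str.join "." (PySem.List.slice parts none (some (-2))) ++ "." ++ PySem.List.pyGetD parts (-1) "",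
     (PySem.Int.ofStr? (PySem.List.pyGetD parts (-2) "")).getD 0, 2)
  else (key, 0, 0)

-- B's reconstruction from the stored kind
def pvNewKey (pfx okey : String) (kind idx : Int) : String :=
  if kind == 1 then pfx ++ "." ++ PySem.Int.toStr idx
  else if kind == 2 then
    let parts := pvSplitDot okey
    PySem.Str.join "." (PySem.List.slice parts none (some (-2)) ++ [PySem.Int.toStr idx, PySem.List.pyGetD parts (-1) ""])
  else okey

-- B: one parse pass building the record list and the prefix-order skeleton, one
-- global stable sort by the numeric index, one bucketing pass, then emission.
def reindex_keys_with_mapping_alt (original_dict : List (String × Int)) : List (String × String) :=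
  let items := pvItems original_dict
  let st := items.foldl
    (fun s kv =>
      let pnk := pvParse kv.1
      (s.1 ++ [(pnk.2.1, kv.2, pnk.1, kv.1, pnk.2.2)],
       s.2.modify kv.2 PySem.Dict.empty (fun dd => dd.insert pnk.1 ())))
    (([] : List (Int × Int × String × String × Int)),
     (PySem.Dict.empty : PySem.Dict Int (PySem.Dict String Unit)))
  let records := PySem.List.sorted st.1 (fun r => r.1) false
  let buckets := records.foldl
    (fun d r => d.modify (r.2.1, r.2.2.1) [] (fun l => l ++ [(r.2.2.2.1, r.2.2.2.2)]))
    (PySem.Dict.empty : PySem.Dict (Int × String) (List (String × Int)))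
  let km := st.2.items.foldl
    (fun km vp =>
      vp.2.keys.foldl
        (fun km p =>
          (PySem.List.enumerate (buckets.getD (vp.1, p) []) 0).foldl
            (fun km e => km.insert e.2.1 (pvNewKey p e.2.1 e.2.2 e.1)) km)
        km)
    PySem.Dict.empty
  km.items

-- ===== PRECONDITION & SPEC =====
def Spec_reindex_keys_with_mapping (original_dict : List (String × Int)) (out : List (String × String)) : Prop := out = reindex_keys_with_mapping_alt original_dict
instance (original_dict : List (String × Int)) (out : List (String × String)) : Decidable (Spec_reindex_keys_with_mapping original_dict out) := by unfold Spec_reindex_keys_with_mapping; infer_instance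

-- ===== CLAIM (what is proved, stated in full; the proofs are below) =====
def Claim_equal_reindex_keys_with_mapping : Prop := ∀ (original_dict : List (String × Int)), Dom_reindex_keys_with_mapping original_dict → Spec_reindex_keys_with_mapping original_dict (reindex_keys_with_mapping original_dict)

-- ===== LEMMAS AND PROOFS =====

-- abbreviations for the three components of a parsed key
def pvPfx (k : String) : String := (pvParse k).1
def pvNum (k : String) : Int := (pvParse k).2.1
def pvKind (k : String) : Int := (pvParse k).2.2

-- B's per-item record
def pvRec (kv : String × Int) : Int × Int × String × String × Int :=
  (pvNum kv.1, kv.2, pvPfx kv.1, kv.1, pvKind kv.1)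

-- the common normal form both ports are reduced to
def pvKeysV (L : List (String × Int)) (v : Int) : List String :=
  (L.filter (fun kv => kv.2 == v)).map (fun kv => kv.1)

def pvMembA (ks : List String) (p : String) : List (Int × String) :=
  (ks.filter (fun k => pvPfx k == p)).map (fun k => (pvNum k, k))

def pvMembR (ks : List String) (p : String) : List (Int × String × Int) :=
  (ks.filter (fun k => pvPfx k == p)).map (fun k => (pvNum k, k, pvKind k))

def pvEmit (p : String) (recs : List (Int × String × Int)) : List (String × String) :=
  (PySem.List.enumerate (PySem.List.sorted recs (fun r => r.1) false) 0).map
    (fun e => (e.2.2.1, pvNewKey p e.2.2.1 e.2.2.2 e.1))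

def pvNormal (L : List (String × Int)) : List (String × String) :=
  (PySem.Set.ofList (L.map (fun kv => kv.2))).flatMap (fun v =>
    (PySem.Set.ofList ((pvKeysV L v).map pvPfx)).flatMap (fun p =>
      pvEmit p (pvMembR (pvKeysV L v) p)))

def pvIns (d : PySem.Dict String String) (e : String × String) : PySem.Dict String String :=
  d.insert e.1 e.2

-- ---- generic lemmas ----

theorem pv_foldl_flatMap {α β γ : Type} (l : List α) (g : α → List β) (f : γ → β → γ) (init : γ) :
    l.foldl (fun acc x => (g x).foldl f acc) init = (l.flatMap g).foldl f init := by
  induction l generalizing init with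
  | nil => rfl
  | cons x l ih => simp [List.flatMap_cons, List.foldl_append, ih]

theorem pv_grouping {κ γ β : Type} [BEq κ] [LawfulBEq κ] (L : List γ) (key : γ → κ) (val : γ → β) :
    (L.foldl (fun d x => d.modify (key x) [] (fun l => l ++ [val x])) PySem.Dict.empty).items
    = (PySem.Set.ofList (L.map key)).map (fun c => (c, (L.filter (fun x => key x == c)).map val)) := by
  have hnd : (L.foldl (fun d x => d.modify (key x) [] (fun l => l ++ [val x])) PySem.Dict.empty).keys.Nodup :=
    PySem.Dict.nodup_keys_foldl_modify_key L key [] (fun _ x => fun l => l ++ [val x])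
      PySem.Dict.empty (by simp [PySem.Dict.keys_empty])
  rw [PySem.Dict.items_eq_map_keys _ hnd []]
  rw [PySem.Dict.keys_foldl_modify_key L key [] (fun _ x => fun l => l ++ [val x]) PySem.Dict.empty]
  rw [show (PySem.Dict.empty : PySem.Dict κ (List β)).keys = [] from rfl, PySem.Set.update_nil_left]
  apply List.map_congr_left
  intro c hc
  have hfold := PySem.Dict.getD_foldl_modify_append
    (L.map (fun x => ((key x, val x) : κ × β))) PySem.Dict.empty c
  rw [List.foldl_map] at hfold
  rw [hfold]
  simp [List.filter_map, List.map_map, Function.comp_def]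

-- getD through a general modify loop: the folds of the matching items' updates
theorem pv_getD_foldl_modify {α κ ν : Type} [BEq κ] [LawfulBEq κ] [DecidableEq κ]
    (L : List α) (key : α → κ) (f : α → ν → ν) (d0 : ν) (d : PySem.Dict κ ν) (c : κ) :
    (L.foldl (fun d x => d.modify (key x) d0 (f x)) d).getD c d0
    = (L.filter (fun x => key x == c)).foldl (fun acc x => f x acc) (d.getD c d0) := by
  induction L generalizing d with
  | nil => rfl
  | cons x t ih =>
    rw [List.foldl_cons, ih, List.filter_cons]
    by_cases h : key x = c
    · simp [h]
    · have hne : ¬ c = key x := fun hc => h hc.symm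
      simp [h, PySem.Dict.getD_modify, hne]

theorem pv_insertBy_map {α β : Type} (f : α → β) (ba : α → α → Bool) (bb : β → β → Bool)
    (h : ∀ x y, bb (f x) (f y) = ba x y) (x : α) (ys : List α) :
    PySem.List.insertBy bb (f x) (ys.map f) = (PySem.List.insertBy ba x ys).map f := by
  induction ys with
  | nil => rfl
  | cons y t ih =>
    simp only [List.map_cons, PySem.List.insertBy, h]
    cases hb : ba x y <;> simp [ih]

theorem pv_sorted_map {α β : Type} (f : α → β) (ka : α → Int) (kb : β → Int)
    (h : ∀ a, kb (f a) = ka a) (l : List α) :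
    PySem.List.sorted (l.map f) kb false = (PySem.List.sorted l ka false).map f := by
  rw [PySem.List.sorted_eq_foldl_insertBy, PySem.List.sorted_eq_foldl_insertBy, List.foldl_map]
  suffices hgen : ∀ acc : List α,
      l.foldl (fun acc x => PySem.List.insertBy (fun a b => decide (kb a < kb b)) (f x) acc) (acc.map f)
      = (l.foldl (fun acc x => PySem.List.insertBy (fun a b => decide (ka a < ka b)) x acc) acc).map f by
    simpa using hgen []
  induction l with
  | nil => intro acc; rfl
  | cons x t ih =>
    intro acc
    simp only [List.foldl_cons]
    rw [pv_insertBy_map f (fun a b => decide (ka a < ka b)) (fun a b => decide (kb a < kb b)) (fun a b => by simp [h]) x acc, ih]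

theorem pv_enumerate_map {α β : Type} (f : α → β) (l : List α) (s : Int) :
    PySem.List.enumerate (l.map f) s = (PySem.List.enumerate l s).map (fun e => (e.1, f e.2)) := by
  induction l generalizing s with
  | nil => rfl
  | cons x t ih => simp [PySem.List.enumerate_cons, ih]

-- insertBy puts x in front when it sorts before the head
theorem pv_insertBy_front {α : Type} (b : α → α → Bool) (x : α) (l : List α)
    (h : ∀ z, l.head? = some z → b x z = true) :
    PySem.List.insertBy b x l = x :: l := by
  cases l with
  | nil => rfl
  | cons z t => simp [PySem.List.insertBy, h z rfl]

-- filter commutes with stable insertion into an already-ordered list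
theorem pv_filter_insertBy {α : Type} (key : α → Int) (p : α → Bool) (x : α) (l : List α)
    (hl : l.Pairwise (fun a b => key a ≤ key b)) :
    (PySem.List.insertBy (fun a b => decide (key a < key b)) x l).filter p
    = if p x then PySem.List.insertBy (fun a b => decide (key a < key b)) x (l.filter p)
      else l.filter p := by
  induction l with
  | nil =>
    cases hp : p x <;> simp [PySem.List.insertBy, hp]
  | cons y t ih =>
    have hyt : ∀ z ∈ t, key y ≤ key z := (List.pairwise_cons.mp hl).1
    have ht : t.Pairwise (fun a b => key a ≤ key b) := (List.pairwise_cons.mp hl).2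
    by_cases hb : key x < key y
    · have h1 : PySem.List.insertBy (fun a b => decide (key a < key b)) x (y :: t) = x :: y :: t := by
        simp [PySem.List.insertBy, hb]
      rw [h1]
      cases hp : p x with
      | false => simp [List.filter_cons, hp]
      | true =>
        have hfront : PySem.List.insertBy (fun a b => decide (key a < key b)) x ((y :: t).filter p)
            = x :: (y :: t).filter p := by
          apply pv_insertBy_front
          intro z hz
          have hzmem : z ∈ (y :: t).filter p := by
            cases hf : (y :: t).filter p with
            | nil => rw [hf] at hz; simp at hz
            | cons a u =>
              rw [hf] at hz
              simp only [List.head?_cons, Option.some.injEq] at hz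
              simp [hz]
          have hzmem' : z ∈ y :: t := List.mem_of_mem_filter hzmem
          rcases List.mem_cons.mp hzmem' with hzy | hzt
          · subst hzy; simp [hb]
          · have := hyt z hzt; simp; omega
        rw [hfront]
        simp [hp]
    · have h1 : PySem.List.insertBy (fun a b => decide (key a < key b)) x (y :: t)
          = y :: PySem.List.insertBy (fun a b => decide (key a < key b)) x t := by
        simp [PySem.List.insertBy, hb]
      rw [h1]
      cases hp : p y with
      | false =>
        rw [List.filter_cons_of_neg (by simp [hp]), ih ht, List.filter_cons_of_neg (by simp [hp])]
      | true =>
        rw [List.filter_cons_of_pos (by simp [hp]), ih ht, List.filter_cons_of_pos (by simp [hp])]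
        cases hpx : p x with
        | false => simp
        | true => simp [PySem.List.insertBy, hb]

-- a bucket of a stably sorted list is the stable sort of the bucket (stability)
theorem pv_filter_sorted {α : Type} (key : α → Int) (p : α → Bool) (xs : List α) :
    (PySem.List.sorted xs key false).filter p = PySem.List.sorted (xs.filter p) key false := by
  induction xs using List.reverseRecOn with
  | nil => rfl
  | append_singleton xs x ih =>
    have hsnoc : ∀ (l : List α),
        PySem.List.sorted (l ++ [x]) key false
        = PySem.List.insertBy (fun a b => decide (key a < key b)) x (PySem.List.sorted l key false) := by
      intro l
      rw [PySem.List.sorted_eq_foldl_insertBy, PySem.List.sorted_eq_foldl_insertBy, List.foldl_append]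
      rfl
    rw [hsnoc, pv_filter_insertBy key p x _ (PySem.List.sorted_pairwise xs key), ih, List.filter_append]
    cases hp : p x with
    | false => simp [hp]
    | true =>
      rw [show List.filter p [x] = [x] by simp [hp], hsnoc]
      simp

-- ---- branch-correspondence lemmas ----

theorem pv_drop_last {α : Type} (l : List α) (h : l ≠ []) :
    l.drop (l.length - 1) = [l.getLast h] := by
  have hlen : 0 < l.length := List.length_pos_iff.mpr h
  rw [List.getLast_eq_getElem]
  rw [List.drop_eq_getElem_cons (by omega)]
  simp [List.drop_eq_nil_of_le, Nat.sub_add_cancel hlen]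

theorem pv_pySetD_neg2 {α : Type} (l : List α) (s : α) (h : 2 ≤ l.length) :
    PySem.List.pySetD l (-2) s = l.take (l.length - 2) ++ s :: l.drop (l.length - 1) := by
  have h2 : PySem.List.pySetD l (-2) s = l.set (l.length - 2) s := by
    simp only [PySem.List.pySetD, PySem.List.pySet?, PySem.List.pyIdx?]
    rw [if_neg (by omega), if_pos (by omega)]
    show l.set (l.length - Int.toNat 2) s = _
    rfl
  rw [h2, List.set_eq_take_append_cons_drop, if_pos (by omega)]
  have : l.length - 2 + 1 = l.length - 1 := by omega
  rw [this]

theorem pv_condA (parts : List String) :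
    (decide (1 ≤ parts.length) && PySem.Str.strIsdigit (PySem.List.pyGetD parts (-1) "")) =
    PySem.Str.strIsdigit (PySem.List.pyGetD parts (-1) "") := by
  cases parts with
  | nil => decide
  | cons x t => simp

theorem pv_stepA_eq (d : PySem.Dict String (List (Int × String))) (key : String) :
    pvStepA d key = d.modify (pvPfx key) [] (fun l => l ++ [(pvNum key, key)]) := by
  simp only [pvStepA, pv_condA, pvPfx, pvNum, pvParse]
  split_ifs <;> rfl

theorem pv_recon_eq (okey : String) (idx : Int) :
    pvReconA (pvPfx okey) okey idx = pvNewKey (pvPfx okey) okey (pvKind okey) idx := by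
  simp only [pvReconA, pvNewKey, pvPfx, pvKind, pvParse, pv_condA]
  cases h1 : PySem.Str.strIsdigit (PySem.List.pyGetD (pvSplitDot okey) (-1) "") with
  | true => simp
  | false =>
    cases h2 : (decide (2 ≤ (pvSplitDot okey).length) &&
        PySem.Str.strIsdigit (PySem.List.pyGetD (pvSplitDot okey) (-2) "")) with
    | false => simp
    | true =>
      have hlen : 2 ≤ (pvSplitDot okey).length :=
        of_decide_eq_true (Bool.and_eq_true_iff.mp h2).1
      have hne : pvSplitDot okey ≠ [] := by
        intro hnil; rw [hnil] at hlen; simp at hlen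
      simp only [Bool.false_eq_true, if_false, if_true,
        show ((2:Int) == 1) = false from rfl, show ((2:Int) == 2) = true from rfl]
      rw [pv_pySetD_neg2 _ _ hlen, pv_drop_last _ hne,
        PySem.List.slice_to_neg_ofNat _ 2 (by omega), PySem.List.pyGetD_neg_one _ _ hne]

-- ---- assembling port A ----

theorem pv_emitA (ks : List String) (p : String) :
    (PySem.List.enumerate (PySem.List.sorted (pvMembA ks p) (fun x => x.1) false) 0).map
      (fun e => (e.2.2, pvReconA p e.2.2 e.1)) = pvEmit p (pvMembR ks p) := by
  have hmm : pvMembA ks p = (pvMembR ks p).map (fun r => (r.1, r.2.1)) := by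
    simp [pvMembA, pvMembR, List.map_map, Function.comp_def]
  rw [hmm, pv_sorted_map (fun r : Int × String × Int => (r.1, r.2.1)) (fun r => r.1) (fun x => x.1) (fun a => rfl),
    pv_enumerate_map]
  unfold pvEmit
  rw [List.map_map]
  apply List.map_congr_left
  intro e he
  have he2 : e.2 ∈ PySem.List.sorted (pvMembR ks p) (fun r => r.1) false := by
    rcases (PySem.List.mem_enumerate_iff _ _ _).mp he with ⟨k, hk, rfl⟩
    exact List.getElem_mem _
  rw [PySem.List.mem_sorted] at he2
  obtain ⟨k, ⟨hkm, hp⟩, hek⟩ := by simpa [pvMembR] using he2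
  simp only [Function.comp_apply]
  have h1 : e.2.2.1 = k := by rw [← hek]
  have h2 : e.2.2.2 = pvKind k := by rw [← hek]
  rw [h1, h2, ← hp]
  exact congrArg (Prod.mk k) (pv_recon_eq k e.1)

theorem pv_portA_norm (od : List (String × Int)) :
    reindex_keys_with_mapping od = ((pvNormal (pvItems od)).foldl pvIns PySem.Dict.empty).items := by
  simp only [reindex_keys_with_mapping, pvNormal]
  generalize pvItems od = L
  rw [pv_grouping L (fun kv => kv.2) (fun kv => kv.1), List.foldl_map, ← pv_foldl_flatMap]
  congr 1
  apply PySem.List.foldl_congr_mem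
  intro km v hv
  simp only [pvKeysV]
  rw [show pvStepA = (fun d k => PySem.Dict.modify d (pvPfx k) [] (fun l => l ++ [(pvNum k, k)]))
      from funext fun d => funext fun k => pv_stepA_eq d k]
  rw [pv_grouping _ pvPfx (fun k => ((pvNum k, k) : Int × String)), List.foldl_map,
    ← pv_foldl_flatMap]
  apply PySem.List.foldl_congr_mem
  intro km2 q hq
  rw [← pv_emitA _ q, List.foldl_map]
  rfl

-- ---- assembling port B ----

theorem pv_membG (L : List (String × Int)) (v : Int) (q : String) :
    (L.filter (fun kv => ((kv.2, (pvParse kv.1).1) : Int × String) == (v, q))).map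
      (fun kv => (((pvParse kv.1).2.1, kv.1, (pvParse kv.1).2.2) : Int × String × Int))
    = pvMembR (pvKeysV L v) q := by
  unfold pvMembR pvKeysV
  rw [List.filter_map, List.map_map]
  have hpred : (fun kv : String × Int => ((kv.2, (pvParse kv.1).1) : Int × String) == (v, q))
      = fun kv : String × Int => (kv.2 == v && ((pvParse kv.1).1 == q)) := rfl
  rw [hpred, ← List.filter_filter, List.filter_comm]
  rfl

-- B's bucket of (value, prefix) = the map of the sorted member triples
theorem pv_bucket (L : List (String × Int)) (v : Int) (q : String) :
    ((PySem.List.sorted (L.map pvRec) (fun r => r.1) false).foldl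
        (fun d r => d.modify ((r.2.1, r.2.2.1) : Int × String) [] (fun l => l ++ [(r.2.2.2.1, r.2.2.2.2)]))
        PySem.Dict.empty).getD (v, q) []
    = (PySem.List.sorted (pvMembR (pvKeysV L v) q) (fun r => r.1) false).map
        (fun t => (t.2.1, t.2.2)) := by
  have hfold := PySem.Dict.getD_foldl_modify_append
    ((PySem.List.sorted (L.map pvRec) (fun r => r.1) false).map
      (fun r => (((r.2.1, r.2.2.1) : Int × String), (r.2.2.2.1, r.2.2.2.2))))
    PySem.Dict.empty ((v, q) : Int × String)
  rw [List.foldl_map] at hfold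
  rw [hfold, List.filter_map, List.map_map, pv_filter_sorted]
  simp only [Function.comp_def]
  rw [List.filter_map]
  have hG : L.filter ((fun r : Int × Int × String × String × Int =>
        ((r.2.1, r.2.2.1) : Int × String) == (v, q)) ∘ pvRec)
      = L.filter (fun kv => ((kv.2, (pvParse kv.1).1) : Int × String) == (v, q)) :=
    List.filter_congr (fun kv _ => rfl)
  rw [hG]
  have hmap : (L.filter (fun kv => ((kv.2, (pvParse kv.1).1) : Int × String) == (v, q))).map pvRec
      = ((L.filter (fun kv => ((kv.2, (pvParse kv.1).1) : Int × String) == (v, q))).map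
          (fun kv => (((pvParse kv.1).2.1, kv.1, (pvParse kv.1).2.2) : Int × String × Int))).map
          (fun t => ((t.1, v, q, t.2.1, t.2.2) : Int × Int × String × String × Int)) := by
    rw [List.map_map]
    apply List.map_congr_left
    intro kv hkv
    have hc : (((kv.2, (pvParse kv.1).1) : Int × String) == (v, q)) = true :=
      (List.mem_filter.mp hkv).2
    have hvq : kv.2 = v ∧ (pvParse kv.1).1 = q := by
      simpa [Prod.ext_iff] using hc
    simp only [Function.comp_apply, pvRec, pvNum, pvPfx, pvKind, hvq.1, hvq.2]
  rw [hmap, pv_membG,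
    pv_sorted_map (fun t : Int × String × Int => ((t.1, v, q, t.2.1, t.2.2) : Int × Int × String × String × Int))
      (fun t => t.1) (fun r => r.1) (fun a => rfl), List.map_map]
  rw [show (PySem.Dict.empty : PySem.Dict (Int × String) (List (String × Int))).getD (v, q) [] = []
      from rfl, List.nil_append]
  exact List.map_congr_left (fun t _ => rfl)

theorem pv_keys_foldl_insert_const {κ ν α : Type} [BEq κ] [LawfulBEq κ]
    (l : List α) (key : α → κ) (v0 : ν) (d : PySem.Dict κ ν) :
    (l.foldl (fun d x => d.insert (key x) v0) d).keys = PySem.Set.update d.keys (l.map key) :=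
  PySem.Dict.keys_foldl_insert_key l key (fun _ _ => v0) d

theorem pv_portB_norm (od : List (String × Int)) :
    reindex_keys_with_mapping_alt od = ((pvNormal (pvItems od)).foldl pvIns PySem.Dict.empty).items := by
  simp only [reindex_keys_with_mapping_alt, pvNormal]
  generalize pvItems od = L
  rw [PySem.List.foldl_prod_mk
    (f := fun acc (kv : String × Int) =>
      acc ++ [((pvParse kv.1).2.1, kv.2, (pvParse kv.1).1, kv.1, (pvParse kv.1).2.2)])
    (g := fun d (kv : String × Int) => PySem.Dict.modify d kv.2 PySem.Dict.empty (fun dd => PySem.Dict.insert dd (pvParse kv.1).1 ()))]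
  have hrec : L.foldl (fun acc (kv : String × Int) =>
      acc ++ [((pvParse kv.1).2.1, kv.2, (pvParse kv.1).1, kv.1, (pvParse kv.1).2.2)]) []
      = L.map pvRec := by
    rw [PySem.List.foldl_append_singleton_eq_map]
    rfl
  rw [hrec]
  -- the skeleton dict: values in first-seen order, each with its prefix set
  have hnd : (L.foldl (fun d (kv : String × Int) =>
      PySem.Dict.modify d kv.2 PySem.Dict.empty (fun dd => PySem.Dict.insert dd (pvParse kv.1).1 ())) PySem.Dict.empty).keys.Nodup :=
    PySem.Dict.nodup_keys_foldl_modify_key L (fun kv => kv.2) PySem.Dict.empty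
      (fun _ kv => fun dd => PySem.Dict.insert dd (pvParse kv.1).1 ()) PySem.Dict.empty
      (by simp [PySem.Dict.keys_empty])
  rw [PySem.Dict.items_eq_map_keys _ hnd PySem.Dict.empty]
  rw [PySem.Dict.keys_foldl_modify_key L (fun kv => kv.2) PySem.Dict.empty
    (fun _ kv => fun dd => PySem.Dict.insert dd (pvParse kv.1).1 ()) PySem.Dict.empty]
  rw [show (PySem.Dict.empty : PySem.Dict Int (PySem.Dict String Unit)).keys = [] from rfl,
    PySem.Set.update_nil_left]
  rw [List.foldl_map, ← pv_foldl_flatMap]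
  congr 1
  apply PySem.List.foldl_congr_mem
  intro km v hv
  have hskel : ((L.foldl (fun d (kv : String × Int) =>
      PySem.Dict.modify d kv.2 PySem.Dict.empty (fun dd => PySem.Dict.insert dd (pvParse kv.1).1 ())) PySem.Dict.empty).getD v PySem.Dict.empty).keys
      = PySem.Set.ofList ((pvKeysV L v).map pvPfx) := by
    rw [pv_getD_foldl_modify L (fun kv => kv.2) (fun kv dd => PySem.Dict.insert dd (pvParse kv.1).1 ()) PySem.Dict.empty
      PySem.Dict.empty v]
    rw [show (PySem.Dict.empty : PySem.Dict Int (PySem.Dict String Unit)).getD v PySem.Dict.empty = PySem.Dict.empty from rfl]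
    rw [pv_keys_foldl_insert_const (L.filter (fun kv => kv.2 == v)) (fun kv => (pvParse kv.1).1) () PySem.Dict.empty]
    rw [show (PySem.Dict.empty : PySem.Dict String Unit).keys = [] from rfl, PySem.Set.update_nil_left]
    rw [pvKeysV, List.map_map]
    rfl
  rw [hskel, ← pv_foldl_flatMap]
  apply PySem.List.foldl_congr_mem
  intro km2 q hq
  rw [pv_bucket L v q, pv_enumerate_map, List.foldl_map]
  simp only [pvEmit]
  rw [List.foldl_map]
  rfl

-- ===== VERDICT (by name: the statement is the Claim_ definition above) =====
theorem reindex_keys_with_mapping_spec : Claim_equal_reindex_keys_with_mapping := by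
  intro od _
  unfold Spec_reindex_keys_with_mapping
  rw [pv_portA_norm, pv_portB_norm]
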